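-- pv_equiv track=rewrite | github.com/chaiminwoo0223/Programmers | Level/level3/program09.py | solution
-- ===== SOURCE A (Python) =====
-- def solution(n, s):
--     result = []
--
--     if n > s:
--         return [-1]
--
--     for _ in range(n):
--         result.append(s // n)
--
--     rest = s - sum(result)
--
--     for i in range(rest):
--         result[i] += 1
--
--     return sorted(result)
-- ===== SOURCE B (Python) =====
-- def solution(n, s):
--     if n > s:
--         return [-1]
--     result = []
--     while n > 0:
--         q = s // n
--         result.append(q)
--         s -= q
--         n -= 1
--     return result
-- ===== Notes on version B (the rewrite author's own statement) =====
-- stated objective: alternative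
-- what changed: B drops A's three stages (build n copies of s//n, increment the first rest entries in place, sort) and instead runs one greedy while-loop that appends floor(s/n) and shrinks the problem to (n-1, s-floor(s/n)), which emits the answer already in ascending order with no second pass and no sort.
import Mathlib
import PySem

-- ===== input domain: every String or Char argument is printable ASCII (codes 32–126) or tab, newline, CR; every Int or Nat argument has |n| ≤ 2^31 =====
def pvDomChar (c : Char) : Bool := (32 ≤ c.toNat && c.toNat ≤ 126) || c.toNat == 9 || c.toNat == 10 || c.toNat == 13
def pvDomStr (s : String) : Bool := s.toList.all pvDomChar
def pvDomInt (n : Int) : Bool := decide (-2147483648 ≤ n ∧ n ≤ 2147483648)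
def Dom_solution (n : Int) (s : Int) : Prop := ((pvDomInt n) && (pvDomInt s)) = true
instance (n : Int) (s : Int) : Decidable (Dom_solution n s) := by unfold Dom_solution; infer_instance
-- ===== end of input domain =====

-- B replaces A's build-loop + increment-loop + sort by a single greedy while-loop that
-- repeatedly emits floor(s/n) and shrinks (n, s), producing the sorted split directly
-- (objective: alternative; no sort, no second pass).


-- ===== PORT A =====
def solution (n : Int) (s : Int) : List Int :=
  if n > s then [-1]
  else
    let result : List Int :=
      (PySem.List.pyRange 0 n 1).foldl (fun acc _ => acc ++ [PySem.Int.floordiv s n]) []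
    let rest : Int := s - result.sum
    let result2 : List Int :=
      (PySem.List.pyRange 0 rest 1).foldl
        (fun acc i => PySem.List.pySetD acc i (PySem.List.pyGetD acc i 0 + 1)) result
    PySem.List.sorted result2 (fun x => x) false

-- ===== PORT B =====
-- B's while-loop: while n > 0: q = s // n; result.append(q); s -= q; n -= 1
def solAltLoop (n : Int) (s : Int) (result : List Int) : List Int :=
  if _h : 0 < n then
    solAltLoop (n - 1) (s - PySem.Int.floordiv s n) (result ++ [PySem.Int.floordiv s n])
  else result
termination_by n.toNat
decreasing_by omega

def solution_alt (n : Int) (s : Int) : List Int :=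
  if n > s then [-1]
  else solAltLoop n s []

-- ===== PRECONDITION & SPEC =====
-- Pre_ excludes exactly the inputs where A raises: n ≤ 0 with 0 < s
-- (the increment loop runs s times over an empty list → IndexError).
def Pre_solution (n : Int) (s : Int) : Prop := ¬(n ≤ 0 ∧ 0 < s)
instance (n : Int) (s : Int) : Decidable (Pre_solution n s) := by unfold Pre_solution; infer_instance
def pvWitness_solution : Int × Int := (3, 7)

def Spec_solution (n : Int) (s : Int) (out : List Int) : Prop := out = solution_alt n s
instance (n : Int) (s : Int) (out : List Int) : Decidable (Spec_solution n s out) := by unfold Spec_solution; infer_instance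

-- ===== CLAIM (what is proved, stated in full; the proofs are below) =====
def Claim_equal_solution : Prop := ∀ (n : Int) (s : Int), Dom_solution n s → Pre_solution n s → Spec_solution n s (solution n s)

-- ===== LEMMAS AND PROOFS =====

-- A's increment loop on a block of m copies of q turns the first k of them into q+1.
theorem incr_loop (k m : Nat) (q : Int) (h : k ≤ m) :
    (PySem.List.pyRange 0 (k : Int) 1).foldl
      (fun acc i => PySem.List.pySetD acc i (PySem.List.pyGetD acc i 0 + 1))
      (List.replicate m q)
    = List.replicate k (q + 1) ++ List.replicate (m - k) q := by
  induction k with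
  | zero => simp
  | succ j ih =>
    have hj : (0:Int) ≤ j := by positivity
    have hcast : ((j+1 : Nat) : Int) = (j : Int) + 1 := by push_cast; ring
    rw [hcast, PySem.List.pyRange_one_succ_right hj, List.foldl_append,
      ih (by omega)]
    have hmk : m - j = (m - (j+1)) + 1 := by omega
    simp only [List.foldl_cons, List.foldl_nil]
    have hget : PySem.List.pyGetD
        (List.replicate j (q+1) ++ List.replicate (m - j) q) ((j:Int)) 0 = q := by
      rw [PySem.List.pyGetD_natCast]
      rw [hmk, List.replicate_succ]
      rw [List.getD_eq_getElem?_getD, List.getElem?_append_right (by simp)]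
      simp
    rw [hget, PySem.List.pySetD_natCast]
    rw [hmk, List.replicate_succ]
    rw [List.set_append_right _ _ (by simp)]
    simp [List.replicate_succ']

-- B's loop does nothing once n ≤ 0.
theorem altLoop_nonpos (n s : Int) (acc : List Int) (h : n ≤ 0) :
    solAltLoop n s acc = acc := by
  unfold solAltLoop
  simp [show ¬ 0 < n by omega]

-- Closed form of B's greedy loop: with q, r = divmod(s, n) it appends
-- (n - r) copies of q followed by r copies of q + 1.
theorem altLoop_closed (k : Nat) : ∀ (n s : Int) (acc : List Int), n.toNat = k → 0 < n → n ≤ s →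
    solAltLoop n s acc
      = acc ++ List.replicate (n - PySem.Int.mod s n).toNat (PySem.Int.floordiv s n)
            ++ List.replicate (PySem.Int.mod s n).toNat (PySem.Int.floordiv s n + 1) := by
  induction k with
  | zero => intro n s acc hk hn _; omega
  | succ j ih =>
    intro n s acc hk hn hns
    set q := PySem.Int.floordiv s n with hq
    set r := PySem.Int.mod s n with hr
    have hr0 : 0 ≤ r := PySem.Int.mod_nonneg s hn
    have hrn : r < n := PySem.Int.mod_lt s hn
    have hqr : q * n + r = s := PySem.Int.floordiv_mul_add_mod s n
    have hq1 : 1 ≤ q := by nlinarith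
    rw [show solAltLoop n s acc
        = solAltLoop (n - 1) (s - q) (acc ++ [q]) by rw [solAltLoop]; simp [hn, hq]]
    by_cases hn1 : n = 1
    · subst hn1
      rw [altLoop_nonpos _ _ _ (by omega)]
      have hr1 : r = 0 := by omega
      rw [hr1]
      simp
    · -- n ≥ 2: one recursive step
      have hn2 : 2 ≤ n := by omega
      have hpos : 0 < n - 1 := by omega
      by_cases hcase : r = n - 1
      · -- the remainder fills the rest: quotient bumps to q + 1
        have hfd : PySem.Int.floordiv (s - q) (n - 1) = q + 1 := by
          rw [PySem.Int.floordiv_eq_iff_of_pos hpos]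
          constructor <;> nlinarith
        have hmd : PySem.Int.mod (s - q) (n - 1) = 0 := by
          have := PySem.Int.floordiv_mul_add_mod (s - q) (n - 1)
          rw [hfd] at this; nlinarith
        rw [ih (n - 1) (s - q) (acc ++ [q]) (by omega) hpos (by nlinarith)]
        rw [hfd, hmd]
        have h1 : (n - r).toNat = 1 := by omega
        have h2 : (n - 1 - 0).toNat = r.toNat := by omega
        rw [h1, h2]
        simp [List.append_assoc]
      · -- remainder unchanged, quotient unchanged
        have hrlt : r < n - 1 := by omega
        have hfd : PySem.Int.floordiv (s - q) (n - 1) = q := by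
          rw [PySem.Int.floordiv_eq_iff_of_pos hpos]
          constructor <;> nlinarith
        have hmd : PySem.Int.mod (s - q) (n - 1) = r := by
          have := PySem.Int.floordiv_mul_add_mod (s - q) (n - 1)
          rw [hfd] at this; nlinarith
        rw [ih (n - 1) (s - q) (acc ++ [q]) (by omega) hpos (by nlinarith)]
        rw [hfd, hmd]
        have h1 : (n - r).toNat = (n - 1 - r).toNat + 1 := by omega
        rw [h1, List.replicate_succ]
        simp [List.append_assoc]

-- ===== VERDICT =====
theorem solution_spec : Claim_equal_solution := by
  intro n s _ hpre
  unfold Pre_solution at hpre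
  unfold Spec_solution solution solution_alt
  by_cases hns : n > s
  · simp [hns]
  · simp only [hns, if_false]
    have hle : n ≤ s := by omega
    by_cases hn : 0 < n
    · -- main case: n ≥ 1
      set q := PySem.Int.floordiv s n with hq
      set r := PySem.Int.mod s n with hr
      have hr0 : 0 ≤ r := PySem.Int.mod_nonneg s hn
      have hrn : r < n := PySem.Int.mod_lt s hn
      have hqr : q * n + r = s := PySem.Int.floordiv_mul_add_mod s n
      -- A: first loop builds replicate n.toNat q
      rw [PySem.List.foldl_append_singleton_eq_map]
      simp only [List.nil_append, List.map_const']
      rw [PySem.List.length_pyRange_one]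
      have hlen : (n - 0).toNat = n.toNat := by omega
      rw [hlen]
      -- rest = r
      have hsum : (List.replicate n.toNat q).sum = n * q := by
        rw [List.sum_replicate, nsmul_eq_mul]
        congr 1; omega
      have hrest : s - (List.replicate n.toNat q).sum = r := by
        rw [hsum]; nlinarith
      rw [hrest]
      -- second loop increments the first r entries
      have hcastr : r = ((r.toNat : Nat) : Int) := by omega
      rw [hcastr, incr_loop r.toNat n.toNat q (by omega)]
      -- A then sorts: the ascending arrangement is the sorted result
      have hperm : (List.replicate (n.toNat - r.toNat) q ++ List.replicate r.toNat (q+1)).Perm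
          (List.replicate r.toNat (q+1) ++ List.replicate (n.toNat - r.toNat) q) :=
        List.perm_append_comm
      have hpair : (List.replicate (n.toNat - r.toNat) q ++ List.replicate r.toNat (q+1)).Pairwise (· ≤ ·) := by
        rw [List.pairwise_append]
        refine ⟨List.pairwise_replicate.mpr (Or.inr le_rfl),
                List.pairwise_replicate.mpr (Or.inr le_rfl), ?_⟩
        intro a ha b hb
        rw [List.eq_of_mem_replicate ha, List.eq_of_mem_replicate hb]; omega
      rw [PySem.List.sorted_id_eq_of_perm_of_pairwise _ _ hperm hpair]
      -- B: the greedy loop's closed form is the same list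
      rw [altLoop_closed n.toNat n s [] rfl hn hle]
      simp only [List.nil_append, ← hq, ← hr]
      congr 2
      omega
    · -- n ≤ 0: Pre_ forces s ≤ 0; A's loops are empty, B's loop never runs
      have hs0 : s ≤ 0 := by omega
      rw [PySem.List.pyRange_one_eq_nil (by omega)]
      simp only [List.foldl_nil, List.sum_nil, sub_zero]
      rw [PySem.List.pyRange_one_eq_nil (by omega)]
      simp only [List.foldl_nil]
      rw [altLoop_nonpos _ _ _ (by omega)]
      simp [PySem.List.sorted]
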